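-- pv_equiv track=rewrite | github.com/pandas-dev/pandas | .venv/lib/python3.12/site-packages/IPython/utils/text.py | strip_email_quotes
-- ===== SOURCE A (Python) =====
-- import string
--
-- def strip_email_quotes(text: str) -> str:
--     """Strip leading email quotation characters ('>').
--
--     Removes any combination of leading '>' interspersed with whitespace that
--     appears *identically* in all lines of the input text.
--
--     Parameters
--     ----------
--     text : str
--
--     Examples
--     --------
--
--     Simple uses::
--
--         In [2]: strip_email_quotes('> > text')
--         Out[2]: 'text'
--
--         In [3]: strip_email_quotes('> > text\\n> > more')
--         Out[3]: 'text\\nmore'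
--
--     Note how only the common prefix that appears in all lines is stripped::
--
--         In [4]: strip_email_quotes('> > text\\n> > more\\n> more...')
--         Out[4]: '> text\\n> more\\nmore...'
--
--     So if any line has no quote marks ('>'), then none are stripped from any
--     of them ::
--
--         In [5]: strip_email_quotes('> > text\\n> > more\\nlast different')
--         Out[5]: '> > text\\n> > more\\nlast different'
--     """
--     lines = text.splitlines()
--     strip_len = 0
--
--     for characters in zip(*lines):
--         # Check if all characters in this position are the same
--         if len(set(characters)) > 1:
--             break
--         prefix_char = characters[0]
--
--         if prefix_char in string.whitespace or prefix_char == ">":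
--             strip_len += 1
--         else:
--             break
--
--     text = "\n".join([ln[strip_len:] for ln in lines])
--     return text
-- ===== SOURCE B (Python) =====
-- import string
--
--
-- def strip_email_quotes(text: str) -> str:
--     """Strip the email-quote prefix ('>' and whitespace) common to all lines.
--
--     Row-major re-implementation: first shrink a candidate common prefix
--     against each line, then take its leading run of quote/whitespace chars.
--     """
--     lines = text.splitlines()
--     prefix = lines[0] if lines else ""
--     for ln in lines[1:]:
--         i = 0
--         while i < len(prefix) and i < len(ln) and prefix[i] == ln[i]:
--             i += 1
--         prefix = prefix[:i]
--     strip_len = 0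
--     while strip_len < len(prefix) and (
--         prefix[strip_len] in string.whitespace or prefix[strip_len] == ">"
--     ):
--         strip_len += 1
--     return "\n".join(ln[strip_len:] for ln in lines)
-- ===== Notes on version B (the rewrite author's own statement) =====
-- stated objective: idiomatic
-- what changed: Replaces A's column-major zip(*lines) transpose-and-scan with a row-major pass that shrinks a candidate common prefix against each line and then takes the length of its leading run of quote/whitespace characters.
import Mathlib
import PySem

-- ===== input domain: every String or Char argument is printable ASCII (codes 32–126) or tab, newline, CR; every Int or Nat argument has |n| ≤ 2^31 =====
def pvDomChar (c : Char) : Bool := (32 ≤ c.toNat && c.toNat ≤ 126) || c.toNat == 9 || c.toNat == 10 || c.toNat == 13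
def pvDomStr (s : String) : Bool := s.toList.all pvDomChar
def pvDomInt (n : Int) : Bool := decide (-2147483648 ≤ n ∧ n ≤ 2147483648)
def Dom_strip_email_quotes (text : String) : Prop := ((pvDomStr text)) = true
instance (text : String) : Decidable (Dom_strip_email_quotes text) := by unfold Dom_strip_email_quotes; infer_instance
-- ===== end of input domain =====

-- B replaces A's column-major zip(*lines) transpose with a row-major shrink of a
-- candidate common prefix followed by a leading quote-run scan (objective: idiomatic).

-- shared helper: Python's `c in string.whitespace or c == ">"` (both versions test it verbatim)
def pvIsQuoteWS (c : Char) : Bool :=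
  [' ', '\t', '\n', Char.ofNat 11, Char.ofNat 12, '\r'].contains c || c == '>'

-- shared output step: both Pythons end with '\n'.join(ln[strip_len:] for ln in lines)
def pvOut (lines : List (List Char)) (n : Nat) : String :=
  PySem.Str.join "\n"
    (lines.map (fun ln => String.ofList (PySem.List.slice ln (some (n : Int)) none)))

-- ===== PORT A =====
-- termination helpers for the zip(*lines) transpose
theorem pvTailSum_le (ls : List (List Char)) :
    ((ls.map List.tail).map List.length).sum ≤ (ls.map List.length).sum := by
  induction ls with
  | nil => simp
  | cons l rest ih =>
    simp only [List.map_cons, List.sum_cons]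
    have : l.tail.length ≤ l.length := by cases l <;> simp
    omega

theorem pvTailSum_lt (ls : List (List Char)) (h1 : ls ≠ []) (h2 : [] ∉ ls) :
    ((ls.map List.tail).map List.length).sum < (ls.map List.length).sum := by
  cases ls with
  | nil => exact absurd rfl h1
  | cons l rest =>
    have hl : l ≠ [] := by intro h; exact h2 (h ▸ List.mem_cons_self)
    have hlen : l.tail.length < l.length := by
      cases l with
      | nil => exact absurd rfl hl
      | cons a as => simp
    have := pvTailSum_le rest
    simp only [List.map_cons, List.sum_cons]
    omega

-- zip(*lines): the columns of `lines`, truncated at the shortest line (Python-exact)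
def pvZipStar (ls : List (List Char)) : List (List Char) :=
  if h : ls = [] ∨ [] ∈ ls then []
  else (ls.map (·.headD ' ')) :: pvZipStar (ls.map List.tail)
termination_by (ls.map List.length).sum
decreasing_by
  simpa using pvTailSum_lt ls (fun h1 => h (Or.inl h1)) (fun h2 => h (Or.inr h2))

-- A's for-loop over the columns, accumulating strip_len
def pvALoop : List (List Char) → Nat → Nat
  | [], n => n
  | col :: rest, n =>
    if 1 < PySem.Set.len (PySem.Set.ofList col) then n          -- len(set(characters)) > 1: break
    else
      let c := col.headD ' '                                    -- prefix_char = characters[0]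
      if pvIsQuoteWS c then pvALoop rest (n + 1) else n

def strip_email_quotes (text : String) : String :=
  pvOut ((PySem.Str.splitlines text).map String.toList)
    (pvALoop (pvZipStar ((PySem.Str.splitlines text).map String.toList)) 0)

-- ===== PORT B =====
-- the inner while loop: advance i over prefix/ln while the chars agree, then take prefix[:i]
def pvShrink : List Char → List Char → List Char
  | a :: p, b :: l => if a = b then a :: pvShrink p l else []
  | _, _ => []

-- the strip_len while loop: count the leading run of quote/whitespace characters
def pvQuoteRun : List Char → Nat
  | [] => 0
  | c :: cs => if pvIsQuoteWS c then pvQuoteRun cs + 1 else 0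

def strip_email_quotes_alt (text : String) : String :=
  pvOut ((PySem.Str.splitlines text).map String.toList)
    (pvQuoteRun (((PySem.Str.splitlines text).map String.toList).tail.foldl pvShrink
      (((PySem.Str.splitlines text).map String.toList).headD [])))

-- ===== PRECONDITION & SPEC =====
def Spec_strip_email_quotes (text : String) (out : String) : Prop := out = strip_email_quotes_alt text
instance (text : String) (out : String) : Decidable (Spec_strip_email_quotes text out) := by unfold Spec_strip_email_quotes; infer_instance

-- ===== CLAIM (what is proved, stated in full; the proofs are below) =====
def Claim_equal_strip_email_quotes : Prop := ∀ (text : String), Dom_strip_email_quotes text → Spec_strip_email_quotes text (strip_email_quotes text)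

-- ===== LEMMAS AND PROOFS =====

theorem pvALoop_acc (cols : List (List Char)) (n : Nat) :
    pvALoop cols n = n + pvALoop cols 0 := by
  induction cols generalizing n with
  | nil => simp [pvALoop]
  | cons col rest ih =>
    simp only [pvALoop]
    split_ifs with h1 h2
    · omega
    · rw [ih (n + 1), ih 1]; omega
    · omega

theorem pvShrink_prefix_left (p l : List Char) : pvShrink p l <+: p := by
  induction p generalizing l with
  | nil => cases l <;> simp [pvShrink]
  | cons a p ih =>
    cases l with
    | nil => simp [pvShrink]
    | cons b l =>
      simp only [pvShrink]
      split_ifs with h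
      · obtain ⟨t, ht⟩ := ih l
        exact ⟨t, by simp [ht]⟩
      · simp

theorem pvShrink_prefix_right (p l : List Char) : pvShrink p l <+: l := by
  induction p generalizing l with
  | nil => cases l <;> simp [pvShrink]
  | cons a p ih =>
    cases l with
    | nil => simp [pvShrink]
    | cons b l =>
      simp only [pvShrink]
      split_ifs with h
      · subst h
        obtain ⟨t, ht⟩ := ih l
        exact ⟨t, by simp [ht]⟩
      · simp

theorem pvFoldl_shrink_prefix (ls : List (List Char)) (p : List Char) :
    ls.foldl pvShrink p <+: p := by
  induction ls generalizing p with
  | nil => simp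
  | cons l rest ih =>
    exact (ih (pvShrink p l)).trans (pvShrink_prefix_left p l)

theorem pvFoldl_shrink_prefix_mem (ls : List (List Char)) (p l : List Char) (h : l ∈ ls) :
    ls.foldl pvShrink p <+: l := by
  induction ls generalizing p with
  | nil => cases h
  | cons a rest ih =>
    rcases List.mem_cons.mp h with rfl | hmem
    · exact (pvFoldl_shrink_prefix rest (pvShrink p l)).trans (pvShrink_prefix_right p l)
    · exact ih (pvShrink p a) hmem

theorem pvFoldl_shrink_nil (ls : List (List Char)) : ls.foldl pvShrink [] = [] := by
  induction ls with
  | nil => rfl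
  | cons l rest ih => cases l <;> simpa [pvShrink]

theorem pvShrink_cons_cons (c : Char) (p l : List Char) :
    pvShrink (c :: p) (c :: l) = c :: pvShrink p l := by
  simp [pvShrink]

theorem pvFoldl_shrink_uniform (ls : List (List Char)) (c : Char) (p : List Char)
    (h : ∀ l ∈ ls, ∃ t, l = c :: t) :
    ls.foldl pvShrink (c :: p) = c :: (ls.map List.tail).foldl pvShrink p := by
  induction ls generalizing p with
  | nil => rfl
  | cons l rest ih =>
    obtain ⟨t, rfl⟩ := h l List.mem_cons_self
    simp only [List.foldl_cons, List.map_cons, List.tail_cons, pvShrink_cons_cons]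
    exact ih (pvShrink p t) (fun l hl => h l (List.mem_cons_of_mem _ hl))

theorem pvSetLen_le_one_of_all_eq (col : List Char) (x : Char) (h : ∀ y ∈ col, y = x) :
    ¬ 1 < PySem.Set.len (PySem.Set.ofList col) := by
  have hnd := PySem.Set.nodup_ofList col
  have hlen : (PySem.Set.ofList col).length ≤ 1 := by
    cases hs : PySem.Set.ofList col with
    | nil => simp
    | cons a t =>
      cases ht : t with
      | nil => simp
      | cons b u =>
        have ha : a = x := h a ((PySem.Set.mem_ofList col a).mp (by rw [hs]; exact List.mem_cons_self))
        have hb : b = x := h b ((PySem.Set.mem_ofList col b).mp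
          (by rw [hs, ht]; exact List.mem_cons_of_mem _ List.mem_cons_self))
        rw [hs, ht] at hnd
        have : a = b := ha.trans hb.symm
        subst this
        have := (List.nodup_cons.mp hnd).1
        simp at this
  simp only [PySem.Set.len]
  omega

theorem pvSetLen_gt_one_of_ne (col : List Char) (a b : Char)
    (ha : a ∈ col) (hb : b ∈ col) (hne : a ≠ b) :
    1 < PySem.Set.len (PySem.Set.ofList col) := by
  have ha' := (PySem.Set.mem_ofList col a).mpr ha
  have hb' := (PySem.Set.mem_ofList col b).mpr hb
  have hlen : 1 < (PySem.Set.ofList col).length := by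
    cases hs : PySem.Set.ofList col with
    | nil => rw [hs] at ha'; cases ha'
    | cons x t =>
      cases ht : t with
      | nil =>
        rw [hs, ht] at ha' hb'
        simp at ha' hb'
        exact absurd (ha'.trans hb'.symm) hne
      | cons y u => simp
  simp only [PySem.Set.len]
  omega

-- the degenerate case: no lines, or some line is empty → B's quote-run is 0
theorem pvEmptyCase (ls : List (List Char)) (h : ls = [] ∨ [] ∈ ls) :
    pvQuoteRun (ls.tail.foldl pvShrink (ls.headD [])) = 0 := by
  rcases h with rfl | hmem
  · rfl
  · cases ls with
    | nil => rfl
    | cons l0 rest =>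
      rcases List.mem_cons.mp hmem with rfl | hmem'
      · simp [pvFoldl_shrink_nil, pvQuoteRun]
      · have hpre := pvFoldl_shrink_prefix_mem rest l0 [] hmem'
        simp only [List.headD_cons, List.tail_cons]
        rw [List.prefix_nil.mp hpre]
        rfl

-- core: A's column scan computes the quote-run length of B's common prefix
theorem pvMain (N : Nat) : ∀ ls : List (List Char), (ls.map List.length).sum ≤ N →
    pvALoop (pvZipStar ls) 0 = pvQuoteRun (ls.tail.foldl pvShrink (ls.headD [])) := by
  induction N with
  | zero =>
    intro ls h
    have hcase : ls = [] ∨ [] ∈ ls := by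
      cases ls with
      | nil => exact Or.inl rfl
      | cons l rest =>
        refine Or.inr ?_
        have : l.length = 0 := by simp only [List.map_cons, List.sum_cons] at h; omega
        exact (List.length_eq_zero_iff.mp this) ▸ List.mem_cons_self
    rw [pvZipStar, dif_pos hcase, pvEmptyCase ls hcase]
    rfl
  | succ N ih =>
    intro ls hsum
    by_cases hcase : ls = [] ∨ [] ∈ ls
    · rw [pvZipStar, dif_pos hcase, pvEmptyCase ls hcase]; rfl
    · push Not at hcase
      obtain ⟨hne, hmem⟩ := hcase
      cases ls with
      | nil => exact absurd rfl hne
      | cons l0 rest =>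
        obtain ⟨c, t0, rfl⟩ : ∃ c t, l0 = c :: t := by
          cases l0 with
          | nil => exact absurd List.mem_cons_self hmem
          | cons c t => exact ⟨c, t, rfl⟩
        rw [pvZipStar, dif_neg (by push Not; exact ⟨hne, hmem⟩)]
        by_cases hall : ∀ l ∈ (c :: t0) :: rest, l.headD ' ' = c
        · -- every line starts with c
          have huni : ∀ l ∈ (c :: t0) :: rest, ∃ t, l = c :: t := by
            intro l hl
            cases hl' : l with
            | nil => exact absurd (hl' ▸ hl) hmem
            | cons d t => exact ⟨t, by rw [← hall l hl, hl']; rfl⟩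
          have hcol : ∀ y ∈ ((c :: t0) :: rest).map (·.headD ' '), y = c := by
            intro y hy
            obtain ⟨l, hl, rfl⟩ := List.mem_map.mp hy
            exact hall l hl
          have hrhs : rest.foldl pvShrink (c :: t0) = c :: (rest.map List.tail).foldl pvShrink t0 :=
            pvFoldl_shrink_uniform rest c t0 (fun l hl => huni l (List.mem_cons_of_mem _ hl))
          simp only [List.tail_cons, List.headD_cons, hrhs]
          simp only [pvALoop, if_neg (pvSetLen_le_one_of_all_eq _ c hcol)]
          have hhead : (((c :: t0) :: rest).map (·.headD ' ')).headD ' ' = c := by simp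
          rw [hhead]
          have htail_sum : (((((c :: t0) :: rest).map List.tail)).map List.length).sum ≤ N := by
            have := pvTailSum_lt ((c :: t0) :: rest) hne hmem
            omega
          have hih := ih (((c :: t0) :: rest).map List.tail) htail_sum
          simp only [List.map_cons, List.tail_cons, List.headD_cons] at hih
          by_cases hq : pvIsQuoteWS c
          · simp only [hq, if_true, List.map_cons, List.tail_cons, pvQuoteRun]
            rw [pvALoop_acc, hih]
            omega
          · simp [hq, pvQuoteRun]
        · -- two lines start differently: the common prefix is empty and A breaks at column 0
          push Not at hall
          obtain ⟨l, hl, hlne⟩ := hall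
          have hca : c ∈ ((c :: t0) :: rest).map (·.headD ' ') :=
            List.mem_map.mpr ⟨c :: t0, List.mem_cons_self, rfl⟩
          have hcb : l.headD ' ' ∈ ((c :: t0) :: rest).map (·.headD ' ') :=
            List.mem_map.mpr ⟨l, hl, rfl⟩
          simp only [pvALoop, if_pos (pvSetLen_gt_one_of_ne _ _ _ hcb hca hlne)]
          -- RHS: the folded prefix is []
          have hnil : rest.foldl pvShrink (c :: t0) = [] := by
            cases hP : rest.foldl pvShrink (c :: t0) with
            | nil => rfl
            | cons d P =>
              exfalso
              have hdc : c = d := by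
                have := pvFoldl_shrink_prefix rest (c :: t0)
                rw [hP] at this
                obtain ⟨u, hu⟩ := this
                simpa using congrArg (·.headD ' ') hu.symm
              subst hdc
              rcases List.mem_cons.mp hl with rfl | hl'
              · exact hlne rfl
              · have := pvFoldl_shrink_prefix_mem rest (c :: t0) l hl'
                rw [hP] at this
                obtain ⟨u, hu⟩ := this
                exact hlne (by simpa using congrArg (·.headD ' ') hu.symm)
          simp [hnil, pvQuoteRun]

-- ===== VERDICT (by name: the statement is the Claim_ definition above) =====
theorem strip_email_quotes_spec : Claim_equal_strip_email_quotes := by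
  intro text _
  unfold Spec_strip_email_quotes strip_email_quotes strip_email_quotes_alt
  rw [pvMain (((PySem.Str.splitlines text).map String.toList).map List.length).sum _ le_rfl]
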